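-- pv_equiv track=rewrite | github.com/BigAngryDinosaur/amazonoa | packaging_automation/solution.py | packaging
-- ===== SOURCE A (Python) =====
-- def packaging(numGroups, arr):
--     """
--     :type numGroups: int
--     :type arr: List[int]
--     :rtype: int
--     """
--     maxItems = 0
--     if not arr or not numGroups:
--         return 0
--     for a in sorted(arr):
--         if a > maxItems:
--             maxItems += 1
--         elif a == maxItems:
--             continue
--         else:
--             return maxItems
--     return maxItems
-- ===== SOURCE B (Python) =====
-- def packaging(numGroups, arr):
--     if not arr or not numGroups:
--         return 0
--     freq = {}
--     for a in arr:
--         freq[a] = freq.get(a, 0) + 1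
--     count = 0
--     for v in sorted(freq):
--         if v < count:
--             return count
--         count = min(count + freq[v], v)
--     return count
-- ===== Notes on version B (the rewrite author's own statement) =====
-- stated objective: alternative
-- what changed: B builds a frequency map once and walks the distinct values in ascending order, updating the count with one closed-form min(count+f, v) step per distinct value, instead of A's element-by-element increment over the fully sorted array.
import Mathlib
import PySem

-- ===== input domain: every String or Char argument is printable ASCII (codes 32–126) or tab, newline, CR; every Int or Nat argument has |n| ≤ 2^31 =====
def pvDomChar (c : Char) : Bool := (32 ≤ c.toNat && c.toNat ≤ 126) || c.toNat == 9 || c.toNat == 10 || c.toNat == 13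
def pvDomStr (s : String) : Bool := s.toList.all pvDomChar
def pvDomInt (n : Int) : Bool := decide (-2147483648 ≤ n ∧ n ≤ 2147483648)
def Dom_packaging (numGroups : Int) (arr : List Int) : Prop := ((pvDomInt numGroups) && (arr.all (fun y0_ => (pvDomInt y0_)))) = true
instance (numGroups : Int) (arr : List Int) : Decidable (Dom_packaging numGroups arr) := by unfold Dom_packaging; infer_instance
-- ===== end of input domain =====

-- B replaces A's element-by-element walk over sorted(arr) by a frequency map plus one
-- closed-form min(count+f, v) step per distinct value, in ascending value order (alternative decomposition).


-- ===== PORT A =====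
-- the for-loop with its early return: state = maxItems
def packagingLoopA : List Int → Int → Int
  | [], m => m
  | a :: t, m =>
      if a > m then packagingLoopA t (m + 1)
      else if a = m then packagingLoopA t m
      else m

def packaging (numGroups : Int) (arr : List Int) : Int :=
  let maxItems : Int := 0
  if arr = [] ∨ numGroups = 0 then 0
  else packagingLoopA (PySem.List.sorted arr (fun x => x) false) maxItems

-- ===== PORT B =====
-- B's loop over the distinct values in ascending order: state = count
def packagingLoopB (freq : PySem.Dict Int Int) : List Int → Int → Int
  | [], c => c
  | v :: t, c =>
      if v < c then c
      else packagingLoopB freq t (min (c + freq.getD v 0) v)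

def packaging_alt (numGroups : Int) (arr : List Int) : Int :=
  if arr = [] ∨ numGroups = 0 then 0
  else
    let freq := arr.foldl (fun d a => d.insert a (d.getD a 0 + 1)) PySem.Dict.empty
    packagingLoopB freq (PySem.List.sorted freq.keys (fun x => x) false) 0

-- ===== PRECONDITION & SPEC =====
def Spec_packaging (numGroups : Int) (arr : List Int) (out : Int) : Prop := out = packaging_alt numGroups arr
instance (numGroups : Int) (arr : List Int) (out : Int) : Decidable (Spec_packaging numGroups arr out) := by unfold Spec_packaging; infer_instance

-- ===== CLAIM (what is proved, stated in full; the proofs are below) =====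
def Claim_equal_packaging : Prop := ∀ (numGroups : Int) (arr : List Int), Dom_packaging numGroups arr → Spec_packaging numGroups arr (packaging numGroups arr)

-- ===== LEMMAS AND PROOFS =====

-- A's loop consumes a block of f equal values v in one closed-form step
lemma packagingLoopA_replicate (v : Int) : ∀ (f : Nat) (t : List Int) (m : Int), 0 < f →
    packagingLoopA (List.replicate f v ++ t) m =
      if v < m then m else packagingLoopA t (min (m + f) v) := by
  intro f
  induction f with
  | zero => intro t m h; omega
  | succ f ih =>
    intro t m _
    by_cases hf : f = 0
    · subst hf
      simp only [List.replicate, List.nil_append, List.cons_append, packagingLoopA]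
      by_cases h1 : v > m
      · have : min (m + (1 : Nat)) v = m + 1 := by push_cast; omega
        simp [h1, show ¬ v < m by omega]
      · by_cases h2 : v = m
        · have : min (m + (1 : Nat)) v = m := by push_cast; omega
          simp [h2]
        · simp [h1, h2, show v < m by omega]
    · have hfpos : 0 < f := Nat.pos_of_ne_zero hf
      rw [List.replicate_succ, List.cons_append]
      simp only [packagingLoopA]
      by_cases h1 : v > m
      · rw [if_pos h1, ih t (m + 1) hfpos, if_neg (by omega)]
        have : min (m + 1 + (f : Int)) v = min (m + ((f : Nat) + 1 : Nat)) v := by push_cast; ring_nf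
        rw [this, if_neg (by omega)]
      · by_cases h2 : v = m
        · rw [if_neg h1, if_pos h2, ih t m hfpos, if_neg (by omega), if_neg (by omega)]
          have : min (m + (f : Int)) v = min (m + ((f : Nat) + 1 : Nat)) v := by push_cast; omega
          rw [this]
        · rw [if_neg h1, if_neg h2, if_pos (by omega)]

-- A's loop over the concatenation of blocks equals B's loop over the distinct values
lemma packagingLoops_eq (freq : PySem.Dict Int Int) (c : Int → Nat) :
    ∀ (ks : List Int) (m : Int),
    (∀ v ∈ ks, freq.getD v 0 = (c v : Int) ∧ 0 < c v) →
    packagingLoopA (ks.flatMap (fun v => List.replicate (c v) v)) m = packagingLoopB freq ks m := by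
  intro ks
  induction ks with
  | nil => intro m _; simp [packagingLoopA, packagingLoopB]
  | cons v t ih =>
    intro m h
    obtain ⟨hv, hvpos⟩ := h v (by simp)
    rw [List.flatMap_cons, packagingLoopA_replicate v (c v) _ m hvpos]
    simp only [packagingLoopB, hv]
    split_ifs with h1
    · rfl
    · exact ih _ (fun w hw => h w (by simp [hw]))

-- count of x in the flatMap of replicate-blocks over a nodup key list
lemma count_flatMap_replicate (c : Int → Nat) :
    ∀ (ks : List Int), ks.Nodup → ∀ x : Int,
    (ks.flatMap (fun v => List.replicate (c v) v)).count x = if x ∈ ks then c x else 0 := by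
  intro ks
  induction ks with
  | nil => simp
  | cons v t ih =>
    intro hnd x
    obtain ⟨hvt, hndt⟩ := List.nodup_cons.mp hnd
    rw [List.flatMap_cons, List.count_append, List.count_replicate, ih hndt x]
    by_cases hx : x = v
    · subst hx; simp [hvt]
    · simp [hx, Ne.symm hx]

-- the concatenated blocks are sorted(arr)
lemma pairwise_le_flat (c : Int → Nat) :
    ∀ ks : List Int, ks.Pairwise (· < ·) →
    (ks.flatMap (fun v => List.replicate (c v) v)).Pairwise (· ≤ ·) := by
  intro ks
  induction ks with
  | nil => simp
  | cons v t ihk =>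
    intro hlt
    obtain ⟨hlt1, hltt⟩ := List.pairwise_cons.mp hlt
    rw [List.flatMap_cons]
    apply List.pairwise_append.mpr
    refine ⟨List.pairwise_replicate.mpr (Or.inr le_rfl), ihk hltt, ?_⟩
    intro a ha b hb
    rw [List.eq_of_mem_replicate ha]
    obtain ⟨w, hw, hbw⟩ := List.mem_flatMap.mp hb
    rw [List.eq_of_mem_replicate hbw]
    exact le_of_lt (hlt1 w hw)

lemma sorted_eq_flat (arr : List Int) :
    PySem.List.sorted arr (fun x => x) false =
      (PySem.List.sorted (PySem.Set.ofList arr) (fun x => x) false).flatMap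
        (fun v => List.replicate (arr.count v) v) := by
  set ks := PySem.List.sorted (PySem.Set.ofList arr) (fun x => x) false with hks
  have hndk : ks.Nodup := (PySem.List.sorted_perm _ _ _).nodup_iff.mpr (PySem.Set.nodup_ofList arr)
  have hmem : ∀ x : Int, x ∈ ks ↔ x ∈ arr := by
    intro x
    rw [hks, PySem.List.mem_sorted, PySem.Set.mem_ofList]
  apply PySem.List.sorted_id_eq_of_perm_of_pairwise
  · -- permutation, via counts
    rw [List.perm_iff_count]
    intro x
    rw [count_flatMap_replicate _ ks hndk x]
    by_cases hx : x ∈ arr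
    · simp [(hmem x).mpr hx]
    · rw [if_neg (fun h => hx ((hmem x).mp h))]
      exact (List.count_eq_zero.mpr hx).symm
  · exact pairwise_le_flat _ ks (PySem.List.sorted_ofList_pairwise_lt arr)

-- the frequency dict built by B's first loop IS Counter(arr)
lemma freq_eq_counter (arr : List Int) :
    arr.foldl (fun d a => d.insert a (d.getD a 0 + 1)) PySem.Dict.empty = PySem.Dict.counter arr :=
  PySem.Dict.foldl_insert_getD_add_one_eq_counter arr

-- ===== VERDICT (by name: the statement is the Claim_ definition above) =====
theorem packaging_spec : Claim_equal_packaging := by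
  intro numGroups arr _
  unfold Spec_packaging packaging packaging_alt
  by_cases hg : arr = [] ∨ numGroups = 0
  · simp [hg]
  · simp only [if_neg hg, freq_eq_counter]
    rw [PySem.Dict.keys_counter, sorted_eq_flat]
    apply packagingLoops_eq (PySem.Dict.counter arr) (fun v => arr.count v)
    intro v hv
    have hvarr : v ∈ arr := by
      rw [PySem.List.mem_sorted, PySem.Set.mem_ofList] at hv; exact hv
    exact ⟨PySem.Dict.getD_counter arr v, List.count_pos_iff.mpr hvarr⟩
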